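-- pv_equiv track=rewrite | github.com/luizedu9/ScryX | projeto/simulated_annealing/simulated_annealing.py | find_stores
-- ===== SOURCE A (Python) =====
-- def find_stores(result_table):
--     stores = []
--     for i in range(len(result_table[0])):
--         for j in range(len(result_table)):
--             if (result_table[j][i] != 0):
--                 stores.append(i)
--                 break
--     return(stores)
-- ===== SOURCE B (Python) =====
-- def find_stores(result_table):
--     num_cols = len(result_table[0])
--     hits = set()
--     for row in result_table:
--         for i in range(num_cols):
--             if row[i] != 0:
--                 hits.add(i)
--     return sorted(hits)
-- ===== Notes on version B (the rewrite author's own statement) =====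
-- stated objective: alternative
-- what changed: Replaces A's column-major scan with an early-break inner loop by a row-major full scan that accumulates hit columns in a set and returns them sorted.
-- outside the precondition, e.g. on find_stores([[1], []]): A returns [0], B raises IndexError
import Mathlib
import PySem

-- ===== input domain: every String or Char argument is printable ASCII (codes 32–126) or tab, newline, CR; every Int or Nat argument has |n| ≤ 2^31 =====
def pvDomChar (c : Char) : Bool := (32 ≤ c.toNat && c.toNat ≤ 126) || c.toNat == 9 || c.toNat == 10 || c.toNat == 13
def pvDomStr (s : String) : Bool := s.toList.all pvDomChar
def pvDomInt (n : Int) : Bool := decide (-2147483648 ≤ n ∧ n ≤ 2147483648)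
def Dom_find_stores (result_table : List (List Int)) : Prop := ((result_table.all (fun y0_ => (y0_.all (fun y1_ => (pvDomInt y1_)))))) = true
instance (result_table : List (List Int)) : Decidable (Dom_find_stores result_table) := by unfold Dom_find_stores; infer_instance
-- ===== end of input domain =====

-- B replaces A's column-major scan (inner loop over rows with an early break) by a
-- row-major full scan accumulating hit columns in a set, returned sorted: an
-- alternative decomposition of the same cost.

-- ===== PORT A =====
-- inner 'for j in range(len(result_table))' loop with its break
def fsInnerA (t : List (List Int)) (i : Int) (stores : List Int) : List Int → List Int
  | [] => stores
  | j :: js =>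
      if PySem.List.pyGetD (PySem.List.pyGetD t j []) i 0 ≠ 0 then stores ++ [i]
      else fsInnerA t i stores js

def find_stores (result_table : List (List Int)) : List Int :=
  (PySem.List.pyRange 0 (PySem.List.len (PySem.List.pyGetD result_table 0 []))).foldl
    (fun stores i => fsInnerA result_table i stores
      (PySem.List.pyRange 0 (PySem.List.len result_table))) []

-- ===== PORT B =====
def find_stores_alt (result_table : List (List Int)) : List Int :=
  let numCols := PySem.List.len (PySem.List.pyGetD result_table 0 [])
  let hits : PySem.Set Int :=
    result_table.foldl (fun s row =>
      (PySem.List.pyRange 0 numCols).foldl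
        (fun s i => if PySem.List.pyGetD row i 0 ≠ 0 then PySem.Set.add s i else s) s)
      PySem.Set.empty
  PySem.List.sorted hits (fun x => x)

-- ===== PRECONDITION & SPEC =====
-- Pre_ excludes the empty table (A raises IndexError on result_table[0]) and tables with a
-- row shorter than the first row (there A usually raises IndexError, and on the rare ragged
-- inputs where its early break skips the short row B itself raises; see cites).
def Pre_find_stores (result_table : List (List Int)) : Prop :=
  result_table ≠ [] ∧ ∀ row ∈ result_table, (result_table.headD []).length ≤ row.length
instance (result_table : List (List Int)) : Decidable (Pre_find_stores result_table) := by
  unfold Pre_find_stores; infer_instance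

def pvWitness_find_stores : List (List Int) := [[1, 0], [0, 2]]

def Spec_find_stores (result_table : List (List Int)) (out : List Int) : Prop := out = find_stores_alt result_table
instance (result_table : List (List Int)) (out : List Int) : Decidable (Spec_find_stores result_table out) := by unfold Spec_find_stores; infer_instance

-- ===== CLAIM (what is proved, stated in full; the proofs are below) =====
def Claim_equal_find_stores : Prop := ∀ (result_table : List (List Int)), Dom_find_stores result_table → Pre_find_stores result_table → Spec_find_stores result_table (find_stores result_table)

-- ===== LEMMAS AND PROOFS =====

-- the Bool predicate "column i has a nonzero entry in some row"
def fsHit (t : List (List Int)) (i : Int) : Bool :=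
  t.any (fun row => decide (PySem.List.pyGetD row i 0 ≠ 0))

theorem fsInnerA_eq (t : List (List Int)) (i : Int) (stores js : List Int) :
    fsInnerA t i stores js =
      if js.any (fun j => decide (PySem.List.pyGetD (PySem.List.pyGetD t j []) i 0 ≠ 0))
      then stores ++ [i] else stores := by
  induction js with
  | nil => simp [fsInnerA]
  | cons j js ih =>
      by_cases h : PySem.List.pyGetD (PySem.List.pyGetD t j []) i 0 ≠ 0 <;>
        simp [fsInnerA, h, ih]

theorem any_range_rows (t : List (List Int)) (i : Int) :
    (PySem.List.pyRange 0 (PySem.List.len t)).any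
        (fun j => decide (PySem.List.pyGetD (PySem.List.pyGetD t j []) i 0 ≠ 0)) = fsHit t i := by
  unfold fsHit
  conv_rhs => rw [← PySem.List.map_pyGetD_pyRange_zero t []]
  rw [List.any_map]
  rfl

theorem find_stores_eq_filter (t : List (List Int)) :
    find_stores t =
      (PySem.List.pyRange 0 (PySem.List.len (PySem.List.pyGetD t 0 []))).filter (fsHit t) := by
  unfold find_stores
  rw [PySem.List.foldl_congr_mem _
    (fun stores i => fsInnerA t i stores (PySem.List.pyRange 0 (PySem.List.len t)))
    (fun stores i => if fsHit t i then stores ++ [i] else stores) []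
    (by intro acc x _; simp only []; rw [fsInnerA_eq, any_range_rows])]
  exact PySem.List.foldl_append_if_eq_filter (fsHit t) _ []

-- membership in B's inner fold over the column range
theorem memB_inner (row : List Int) (R : List Int) (s : PySem.Set Int) (x : Int) :
    x ∈ R.foldl (fun s i => if PySem.List.pyGetD row i 0 ≠ 0 then PySem.Set.add s i else s) s ↔
      x ∈ s ∨ (x ∈ R ∧ PySem.List.pyGetD row x 0 ≠ 0) := by
  induction R generalizing s with
  | nil => simp
  | cons j js ih =>
      simp only [List.foldl_cons, ih]
      by_cases h : PySem.List.pyGetD row j 0 ≠ 0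
      · simp only [if_pos h, PySem.Set.mem_add]
        constructor
        · rintro (⟨hs | rfl⟩ | ⟨hm, hz⟩)
          · exact Or.inl hs
          · exact Or.inr ⟨List.mem_cons_self .., h⟩
          · exact Or.inr ⟨List.mem_cons_of_mem _ hm, hz⟩
        · rintro (hs | ⟨hm, hz⟩)
          · exact Or.inl (Or.inl hs)
          · rcases List.mem_cons.mp hm with rfl | hm
            · exact Or.inl (Or.inr rfl)
            · exact Or.inr ⟨hm, hz⟩
      · simp only [if_neg h]
        constructor
        · rintro (hs | ⟨hm, hz⟩)
          · exact Or.inl hs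
          · exact Or.inr ⟨List.mem_cons_of_mem _ hm, hz⟩
        · rintro (hs | ⟨hm, hz⟩)
          · exact Or.inl hs
          · rcases List.mem_cons.mp hm with rfl | hm
            · exact absurd hz h
            · exact Or.inr ⟨hm, hz⟩

theorem nodupB_inner (row : List Int) (R : List Int) (s : PySem.Set Int) (hs : s.Nodup) :
    (R.foldl (fun s i => if PySem.List.pyGetD row i 0 ≠ 0 then PySem.Set.add s i else s) s).Nodup := by
  induction R generalizing s with
  | nil => exact hs
  | cons j js ih =>
      simp only [List.foldl_cons]
      split_ifs with h
      · exact ih _ (PySem.Set.nodup_add s j hs)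
      · exact ih _ hs

-- membership in B's outer fold over the rows
theorem memB_outer (t : List (List Int)) (R : List Int) (s : PySem.Set Int) (x : Int) :
    x ∈ t.foldl (fun s row =>
        R.foldl (fun s i => if PySem.List.pyGetD row i 0 ≠ 0 then PySem.Set.add s i else s) s) s ↔
      x ∈ s ∨ (x ∈ R ∧ ∃ row ∈ t, PySem.List.pyGetD row x 0 ≠ 0) := by
  induction t generalizing s with
  | nil => simp
  | cons r rs ih =>
      simp only [List.foldl_cons, ih, memB_inner]
      constructor
      · rintro ((hs | ⟨hm, hz⟩) | ⟨hm, row, hrow, hz⟩)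
        · exact Or.inl hs
        · exact Or.inr ⟨hm, r, List.mem_cons_self .., hz⟩
        · exact Or.inr ⟨hm, row, List.mem_cons_of_mem _ hrow, hz⟩
      · rintro (hs | ⟨hm, row, hrow, hz⟩)
        · exact Or.inl (Or.inl hs)
        · rcases List.mem_cons.mp hrow with rfl | hrow
          · exact Or.inl (Or.inr ⟨hm, hz⟩)
          · exact Or.inr ⟨hm, row, hrow, hz⟩

theorem nodupB_outer (t : List (List Int)) (R : List Int) (s : PySem.Set Int) (hs : s.Nodup) :
    (t.foldl (fun s row =>
        R.foldl (fun s i => if PySem.List.pyGetD row i 0 ≠ 0 then PySem.Set.add s i else s) s) s).Nodup := by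
  induction t generalizing s with
  | nil => exact hs
  | cons r rs ih => exact ih _ (nodupB_inner r R s hs)

theorem pyRange_pairwise_lt (n : Int) (m : Nat) (h : n = (m : Int)) :
    (PySem.List.pyRange 0 n).Pairwise (· < ·) := by
  subst h
  rw [PySem.List.pyRange_zero_natCast]
  exact List.Pairwise.map _ (fun a b hab => by exact_mod_cast hab) (List.pairwise_lt_range)

theorem find_stores_alt_eq_filter (t : List (List Int)) :
    find_stores_alt t =
      (PySem.List.pyRange 0 (PySem.List.len (PySem.List.pyGetD t 0 []))).filter (fsHit t) := by
  unfold find_stores_alt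
  set R := PySem.List.pyRange 0 (PySem.List.len (PySem.List.pyGetD t 0 [])) with hR
  have hpw : R.Pairwise (· < ·) :=
    pyRange_pairwise_lt _ (PySem.List.pyGetD t 0 []).length (by simp [PySem.List.len])
  have hfpw : (R.filter (fsHit t)).Pairwise (· < ·) := hpw.filter _
  apply PySem.List.sorted_eq_of_perm_of_pairwise_lt _ _ _ _ hfpw
  apply (List.perm_ext_iff_of_nodup ((hpw.imp ne_of_lt).filter _)
    (nodupB_outer t R PySem.Set.empty (by simp [PySem.Set.empty]))).mpr
  intro x
  rw [List.mem_filter, memB_outer]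
  simp [fsHit, PySem.Set.empty, List.any_eq_true]

-- ===== VERDICT (by name: the statement is the Claim_ definition above) =====
theorem find_stores_spec : Claim_equal_find_stores := by
  intro t _ _
  unfold Spec_find_stores
  rw [find_stores_eq_filter, find_stores_alt_eq_filter]
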